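-- pv_equiv track=rewrite | github.com/sed1550/Puzzle-Me | skyscraperssolver.py | check_west_view
-- ===== SOURCE A (Python) =====
-- SIZE = 4
--
-- def check_west_view(value, border_value, board, cell_row, cell_col):
--     invalid_values = [SIZE-count for count in range(border_value-1-cell_col)]
--     if value in invalid_values:
--         return False
--
--     max_value = 0
--     count = 0
--     for col in range(SIZE):
--         curr_value = board[cell_row][col]
--         if col == cell_col:
--             curr_value = value
--         if not curr_value:
--             break
--         if curr_value > max_value:
--             count += 1
--             max_value = curr_value
--         if col == SIZE-1 and count != border_value:
--             return False
--
--     if count > border_value: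
--         return False
--     return True
-- ===== SOURCE B (Python) =====
-- SIZE = 4
--
-- def check_west_view(value, border_value, board, cell_row, cell_col):
--     # closed-form early reject: value in [SIZE-c for c in range(border_value-1-cell_col)]
--     k = border_value - 1 - cell_col
--     if k > 0 and SIZE - k < value <= SIZE:
--         return False
--     # substituted row, prefix up to first falsy cell, visible = new running maxima
--     row = [value if c == cell_col else board[cell_row][c] for c in range(SIZE)]
--     cut = next((i for i, x in enumerate(row) if not x), SIZE)
--     prefix = row[:cut]
--     maxes = [max([0] + prefix[:i]) for i in range(len(prefix))]
--     count = sum(x > m for x, m in zip(prefix, maxes))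
--     if len(prefix) == SIZE and count != border_value:
--         return False
--     return count <= border_value
-- ===== Notes on version B (the rewrite author's own statement) =====
-- stated objective: alternative
-- what changed: A's generated invalid_values list becomes a closed arithmetic range test, and A's single fused loop (substitution, break, running max, count and end-of-row check interleaved) is decomposed into building the substituted row, cutting the prefix before the first falsy cell, counting new running maxima over that prefix, and two final comparisons.
-- outside the precondition, e.g. on check_west_view(1, 1, [[0]], 0, 3): A returns True, B raises IndexError
import Mathlib
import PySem

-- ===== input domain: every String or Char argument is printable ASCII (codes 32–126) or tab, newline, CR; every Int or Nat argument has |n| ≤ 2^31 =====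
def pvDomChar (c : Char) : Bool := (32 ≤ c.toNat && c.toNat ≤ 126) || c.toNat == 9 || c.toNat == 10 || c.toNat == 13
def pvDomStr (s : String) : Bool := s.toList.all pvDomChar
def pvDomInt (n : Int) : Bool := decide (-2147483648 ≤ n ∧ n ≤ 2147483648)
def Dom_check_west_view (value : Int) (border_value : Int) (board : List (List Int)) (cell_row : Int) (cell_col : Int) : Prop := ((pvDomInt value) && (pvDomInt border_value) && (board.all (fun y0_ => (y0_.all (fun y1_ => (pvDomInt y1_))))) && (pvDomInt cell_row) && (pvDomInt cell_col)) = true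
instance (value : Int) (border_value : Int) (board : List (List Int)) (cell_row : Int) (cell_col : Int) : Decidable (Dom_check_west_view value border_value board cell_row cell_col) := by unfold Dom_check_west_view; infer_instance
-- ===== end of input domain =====

-- B replaces A's generated invalid_values list by its closed arithmetic form and the fused
-- scan by substituted-row / falsy-pref / running-maxima-count decomposition (objective: alternative).

-- ===== PORT A =====
-- the for-loop of A over range(SIZE), with break and the col==SIZE-1 early return
def cwvLoopA (value : Int) (border_value : Int) (row : List Int) (cell_col : Int) :
    List Int → Int → Int → Bool
  | [], _, count => if count > border_value then false else true
  | col :: rest, max_value, count =>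
    let curr0 := (PySem.List.pyGet? row col).getD 0
    let curr := if col = cell_col then value else curr0
    if curr = 0 then (if count > border_value then false else true)
    else
      let count' := if curr > max_value then count + 1 else count
      let max' := if curr > max_value then curr else max_value
      if col = 3 ∧ count' ≠ border_value then false
      else cwvLoopA value border_value row cell_col rest max' count'

def check_west_view (value : Int) (border_value : Int) (board : List (List Int)) (cell_row : Int) (cell_col : Int) : Bool :=
  let invalid_values := (PySem.List.pyRange 0 (border_value - 1 - cell_col) 1).map (fun c => 4 - c)
  if value ∈ invalid_values then false
  else
    let row := (PySem.List.pyGet? board cell_row).getD []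
    cwvLoopA value border_value row cell_col (PySem.List.pyRange 0 4 1) 0 0

-- ===== PORT B =====
-- takeWhile (≠ 0) is row[:first falsy index]; pyGetD is exact under Pre_ (row long enough)
def check_west_view_alt (value : Int) (border_value : Int) (board : List (List Int)) (cell_row : Int) (cell_col : Int) : Bool :=
  let k := border_value - 1 - cell_col
  if k > 0 ∧ 4 - k < value ∧ value ≤ 4 then false
  else
    let row := (PySem.List.pyRange 0 4 1).map (fun c =>
      if c = cell_col then value else PySem.List.pyGetD ((PySem.List.pyGet? board cell_row).getD []) c 0)
    let pref := row.takeWhile (fun x => decide (x ≠ 0))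
    let maxes := (List.range pref.length).map (fun i => (pref.take i).foldl max 0)
    let count : Int := ((pref.zip maxes).countP (fun p => p.2 < p.1) : Nat)
    if pref.length = 4 ∧ count ≠ border_value then false
    else count ≤ border_value

-- ===== PRECONDITION & SPEC =====
-- Pre_ excludes inputs where A raises IndexError (cell_row out of range / addressed row shorter
-- than SIZE) and, with them, inputs where A only returns because a falsy cell breaks its scan
-- before reaching the short row's end while B's whole-row substitution raises IndexError there;
-- inputs rejected by the closed-form invalid_values test never touch the board and stay inside.
def Pre_check_west_view (value : Int) (border_value : Int) (board : List (List Int)) (cell_row : Int) (cell_col : Int) : Prop :=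
  (border_value - 1 - cell_col > 0 ∧ 4 - (border_value - 1 - cell_col) < value ∧ value ≤ 4) ∨
  4 ≤ ((PySem.List.pyGet? board cell_row).getD []).length
instance (value : Int) (border_value : Int) (board : List (List Int)) (cell_row : Int) (cell_col : Int) : Decidable (Pre_check_west_view value border_value board cell_row cell_col) := by unfold Pre_check_west_view; infer_instance

def pvWitness_check_west_view : Int × Int × List (List Int) × Int × Int :=
  (2, 2, [[1, 2, 3, 4], [2, 1, 4, 3], [3, 4, 1, 2], [4, 3, 2, 1]], 0, 1)

def Spec_check_west_view (value : Int) (border_value : Int) (board : List (List Int)) (cell_row : Int) (cell_col : Int) (out : Bool) : Prop := out = check_west_view_alt value border_value board cell_row cell_col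
instance (value : Int) (border_value : Int) (board : List (List Int)) (cell_row : Int) (cell_col : Int) (out : Bool) : Decidable (Spec_check_west_view value border_value board cell_row cell_col out) := by unfold Spec_check_west_view; infer_instance

-- ===== CLAIM (what is proved, stated in full; the proofs are below) =====
def Claim_equal_check_west_view : Prop := ∀ (value : Int) (border_value : Int) (board : List (List Int)) (cell_row : Int) (cell_col : Int), Dom_check_west_view value border_value board cell_row cell_col → Pre_check_west_view value border_value board cell_row cell_col → Spec_check_west_view value border_value board cell_row cell_col (check_west_view value border_value board cell_row cell_col)

-- ===== LEMMAS AND PROOFS =====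

lemma cwv_mem_invalid (value k : Int) :
    value ∈ (PySem.List.pyRange 0 k 1).map (fun c => 4 - c) ↔ (k > 0 ∧ 4 - k < value ∧ value ≤ 4) := by
  simp only [List.mem_map, PySem.List.mem_pyRange_one]
  constructor
  · rintro ⟨c, ⟨h1, h2⟩, h3⟩; omega
  · rintro ⟨h1, h2, h3⟩; exact ⟨4 - value, by omega, by omega⟩

-- ===== VERDICT (by name: the statement is the Claim_ definition above) =====
theorem check_west_view_spec : Claim_equal_check_west_view := by
  intro value border_value board cell_row cell_col _hDom hPre
  unfold Spec_check_west_view check_west_view check_west_view_alt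
  by_cases hk : border_value - 1 - cell_col > 0 ∧ 4 - (border_value - 1 - cell_col) < value ∧ value ≤ 4
  · rw [if_pos ((cwv_mem_invalid value _).mpr hk), if_pos hk]
  · rw [if_neg ((cwv_mem_invalid value _).not.mpr hk), if_neg hk]
    have hlen : 4 ≤ ((PySem.List.pyGet? board cell_row).getD []).length := by
      rcases hPre with h | h
      · exact absurd h hk
      · exact h
    set row := (PySem.List.pyGet? board cell_row).getD [] with hrow
    match row, hlen with
    | r0 :: r1 :: r2 :: r3 :: rest, _ =>
      have h4 : PySem.List.pyRange 0 4 1 = [0,1,2,3] := by decide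
      have g0 : PySem.List.pyGet? (r0::r1::r2::r3::rest) 0 = some r0 := by
        have hc : ((0:Nat) : Int) = 0 := by norm_num
        rw [← hc, PySem.List.pyGet?_natCast]; rfl
      have g1 : PySem.List.pyGet? (r0::r1::r2::r3::rest) 1 = some r1 := by
        have hc : ((1:Nat) : Int) = 1 := by norm_num
        rw [← hc, PySem.List.pyGet?_natCast]; rfl
      have g2 : PySem.List.pyGet? (r0::r1::r2::r3::rest) 2 = some r2 := by
        have hc : ((2:Nat) : Int) = 2 := by norm_num
        rw [← hc, PySem.List.pyGet?_natCast]; rfl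
      have g3 : PySem.List.pyGet? (r0::r1::r2::r3::rest) 3 = some r3 := by
        have hc : ((3:Nat) : Int) = 3 := by norm_num
        rw [← hc, PySem.List.pyGet?_natCast]; rfl
      have d0 : PySem.List.pyGetD (r0::r1::r2::r3::rest) 0 0 = r0 := by
        simp [PySem.List.pyGetD, g0]
      have d1 : PySem.List.pyGetD (r0::r1::r2::r3::rest) 1 0 = r1 := by
        simp [PySem.List.pyGetD, g1]
      have d2 : PySem.List.pyGetD (r0::r1::r2::r3::rest) 2 0 = r2 := by
        simp [PySem.List.pyGetD, g2]
      have d3 : PySem.List.pyGetD (r0::r1::r2::r3::rest) 3 0 = r3 := by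
        simp [PySem.List.pyGetD, g3]
      rw [h4]
      simp only [cwvLoopA, List.map_cons, List.map_nil, g0, g1, g2, g3, d0, d1, d2, d3, Option.getD_some]
      set v0 := if (0:Int) = cell_col then value else r0 with hv0
      set v1 := if (1:Int) = cell_col then value else r1 with hv1
      set v2 := if (2:Int) = cell_col then value else r2 with hv2
      set v3 := if (3:Int) = cell_col then value else r3 with hv3
      clear_value v0 v1 v2 v3
      clear hv0 hv1 hv2 hv3 g0 g1 g2 g3 d0 d1 d2 d3 hrow hlen hk hPre _hDom h4
      by_cases hz0 : v0 = 0 <;> by_cases hz1 : v1 = 0 <;> by_cases hz2 : v2 = 0 <;> by_cases hz3 : v3 = 0 <;>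
        simp [hz0, hz1, hz2, hz3, List.takeWhile, List.range_succ, List.countP, List.countP.go,
              Bool.cond_eq_ite] <;>
        (try split_ifs) <;>
        simp only [← decide_not, ← Bool.decide_and, decide_eq_decide] <;>
        first | rfl | omega
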